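-- pv_equiv track=rewrite | github.com/FatecNeoHorizon/API_5SEM_ETL | src/utils/retorno_dimensoes.py | retornar_dim_dev
-- ===== SOURCE A (Python) =====
-- def retornar_dim_dev(devs, devJiraNome):
--     alvo = devJiraNome.strip().lower()
--     vistos, id_calc = set(), 1
--     for dev in devs or []:
--         nome = (dev.get("nome") or "").strip()
--         if not nome:
--             continue
--         k = nome.lower()
--         if k in vistos:
--             continue
--         vistos.add(k)
--         id_calc += 1
--         if k == alvo:
--             return id_calc
--     return 1
-- ===== SOURCE B (Python) =====
-- def retornar_dim_dev(devs, devJiraNome):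
--     alvo = devJiraNome.strip().lower()
--     # one map pass: normalized key of every row
--     keys = [(dev.get("nome") or "").strip().lower() for dev in devs or []]
--     if alvo and alvo in keys:
--         i = keys.index(alvo)
--         # id = 1 + number of distinct non-empty keys up to and including the target's first occurrence
--         return 1 + len({k for k in keys[:i + 1] if k})
--     return 1
-- ===== Notes on version B (the rewrite author's own statement) =====
-- stated objective: alternative
-- what changed: Instead of A's stateful early-exit scan with a seen-set and running counter, B maps all rows to normalized keys, locates the target's first occurrence by index, and computes the id as 1 + the cardinality of the set of non-empty keys in that prefix.
import Mathlib
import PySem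

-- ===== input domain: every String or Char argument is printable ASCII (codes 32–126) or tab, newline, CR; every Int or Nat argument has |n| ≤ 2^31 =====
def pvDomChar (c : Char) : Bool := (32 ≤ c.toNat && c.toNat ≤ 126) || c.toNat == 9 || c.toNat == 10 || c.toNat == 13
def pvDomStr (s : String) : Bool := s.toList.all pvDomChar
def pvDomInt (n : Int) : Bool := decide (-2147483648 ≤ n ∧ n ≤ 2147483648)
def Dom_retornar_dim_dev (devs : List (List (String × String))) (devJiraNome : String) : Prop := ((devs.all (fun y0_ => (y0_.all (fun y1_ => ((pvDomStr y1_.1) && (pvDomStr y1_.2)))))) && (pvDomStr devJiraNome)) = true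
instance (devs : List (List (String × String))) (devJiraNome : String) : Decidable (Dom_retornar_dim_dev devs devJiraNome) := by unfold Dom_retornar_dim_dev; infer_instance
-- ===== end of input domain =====

-- B replaces A's stateful early-exit scan (seen-set + running counter) by: map all rows to normalized keys, find the target's first index, and count the distinct non-empty keys of that prefix as a set cardinality; objective: alternative.


-- ===== PORT A =====
-- the for-loop of A with early return: state = (vistos, id_calc)
def retornar_dim_dev_loop (alvo : String) (devs : List (List (String × String))) (vistos : PySem.Set String) (id_calc : Int) : Int :=
  match devs with
  | [] => 1
  | dev :: rest =>
    -- nome = (dev.get("nome") or "").strip()  (values are strings: `or ""` = the getD default "")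
    let nome := PySem.Str.strip ((PySem.Dict.mk dev).getD "nome" "")
    if nome = "" then retornar_dim_dev_loop alvo rest vistos id_calc
    else
      let k := PySem.Str.lower nome
      if PySem.Set.contains vistos k then retornar_dim_dev_loop alvo rest vistos id_calc
      else
        let vistos' := PySem.Set.add vistos k
        let id' := id_calc + 1
        if k = alvo then id' else retornar_dim_dev_loop alvo rest vistos' id'

def retornar_dim_dev (devs : List (List (String × String))) (devJiraNome : String) : Int :=
  retornar_dim_dev_loop (PySem.Str.lower (PySem.Str.strip devJiraNome)) devs PySem.Set.empty 1

-- ===== PORT B =====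
-- keys = [(dev.get("nome") or "").strip().lower() for dev in devs or []]
def retornar_dim_dev_keys (devs : List (List (String × String))) : List String :=
  devs.map (fun dev => PySem.Str.lower (PySem.Str.strip ((PySem.Dict.mk dev).getD "nome" "")))

def retornar_dim_dev_alt (devs : List (List (String × String))) (devJiraNome : String) : Int :=
  let alvo := PySem.Str.lower (PySem.Str.strip devJiraNome)
  let keys := retornar_dim_dev_keys devs
  if alvo ≠ "" ∧ alvo ∈ keys then
    match PySem.List.index? keys alvo with
    | some i =>
      -- 1 + len({k for k in keys[:i+1] if k})
      1 + ((PySem.Set.ofList ((PySem.List.slice keys none (some ((i : Int) + 1))).filter (fun k => k != ""))).length : Int)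
    | none => 1  -- unreachable: alvo ∈ keys
  else 1

-- ===== PRECONDITION & SPEC =====
def Spec_retornar_dim_dev (devs : List (List (String × String))) (devJiraNome : String) (out : Int) : Prop := out = retornar_dim_dev_alt devs devJiraNome
instance (devs : List (List (String × String))) (devJiraNome : String) (out : Int) : Decidable (Spec_retornar_dim_dev devs devJiraNome out) := by unfold Spec_retornar_dim_dev; infer_instance

-- ===== CLAIM (what is proved, stated in full; the proofs are below) =====
def Claim_equal_retornar_dim_dev : Prop := ∀ (devs : List (List (String × String))) (devJiraNome : String), Dom_retornar_dim_dev devs devJiraNome → Spec_retornar_dim_dev devs devJiraNome (retornar_dim_dev devs devJiraNome)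

-- ===== LEMMAS AND PROOFS =====

-- lower s = "" iff s = ""
theorem lower_eq_empty_iff (s : String) : PySem.Str.lower s = "" ↔ s = "" := by
  constructor
  · intro h
    have := congrArg String.toList h
    simpa [PySem.Str.toList_lower, PySem.Chars.lower] using this
  · intro h; subst h; rfl

-- main invariant: A's loop from an already-seen set acc not containing alvo, with counter 1 + |acc|,
-- equals B's prefix-cardinality formula continued with Set.update acc
theorem loop_eq_prefix_count (alvo : String) (devs : List (List (String × String)))
    (acc : List String) (hacc : alvo ∉ acc) :
    retornar_dim_dev_loop alvo devs acc ((acc.length : Int) + 1) =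
      (if alvo ≠ "" ∧ alvo ∈ retornar_dim_dev_keys devs then
        match PySem.List.index? (retornar_dim_dev_keys devs) alvo with
        | some i =>
          1 + ((PySem.Set.update acc (((retornar_dim_dev_keys devs).take (i + 1)).filter (fun k => k != ""))).length : Int)
        | none => 1
      else 1) := by
  induction devs generalizing acc with
  | nil =>
    simp [retornar_dim_dev_loop, retornar_dim_dev_keys]
  | cons dev rest ih =>
    simp only [retornar_dim_dev_loop]
    have hkeys : retornar_dim_dev_keys (dev :: rest) =
        PySem.Str.lower (PySem.Str.strip ((PySem.Dict.mk dev).getD "nome" "")) :: retornar_dim_dev_keys rest := rfl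
    set nome := PySem.Str.strip ((PySem.Dict.mk dev).getD "nome" "") with hnome
    set k := PySem.Str.lower nome with hk
    set ks := retornar_dim_dev_keys rest with hks
    rw [hkeys]
    by_cases hne : nome = ""
    · -- A skips; k = "" so the cons key is filtered away and cannot be alvo (alvo ≠ "")
      have hk0 : k = "" := by rw [hk, hne]; rfl
      rw [if_pos hne, ih acc hacc]
      by_cases hcond : alvo ≠ "" ∧ alvo ∈ ks
      · obtain ⟨j, hj⟩ := Option.isSome_iff_exists.mp ((PySem.List.index?_isSome_iff ks alvo).mpr hcond.2)
        have hneq : k ≠ alvo := by rw [hk0]; exact fun h => hcond.1 h.symm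
        rw [if_pos hcond, if_pos ⟨hcond.1, by simp [hcond.2]⟩,
          PySem.List.index?_cons_of_ne ks hneq, hj]
        simp [List.take_succ_cons, hk0]
      · rw [if_neg hcond, if_neg (by
          rintro ⟨h1, h2⟩
          rcases List.mem_cons.mp h2 with h | h
          · exact h1 (h.trans hk0)
          · exact hcond ⟨h1, h⟩)]
    · have hkne : k ≠ "" := fun h => hne ((lower_eq_empty_iff nome).mp h)
      rw [if_neg hne]
      by_cases hmem : k ∈ acc
      · -- A skips (already seen); k ≠ alvo since alvo ∉ acc; Set.update absorbs k
        have hc : PySem.Set.contains acc k = true := (PySem.Set.contains_iff acc k).mpr hmem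
        have hneq : k ≠ alvo := fun h => hacc (h ▸ hmem)
        rw [if_pos hc, ih acc hacc]
        by_cases hcond : alvo ≠ "" ∧ alvo ∈ ks
        · obtain ⟨j, hj⟩ := Option.isSome_iff_exists.mp ((PySem.List.index?_isSome_iff ks alvo).mpr hcond.2)
          rw [if_pos hcond, if_pos ⟨hcond.1, by simp [hcond.2]⟩,
            PySem.List.index?_cons_of_ne ks hneq, hj]
          simp [List.take_succ_cons, hkne, PySem.Set.update_cons,
            PySem.Set.add_of_mem hmem]
        · rw [if_neg hcond, if_neg (by
            rintro ⟨h1, h2⟩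
            rcases List.mem_cons.mp h2 with h | h
            · exact hneq h.symm
            · exact hcond ⟨h1, h⟩)]
      · have hc : ¬ PySem.Set.contains acc k = true := fun h => hmem ((PySem.Set.contains_iff acc k).mp h)
        rw [if_neg hc]
        by_cases halvo : k = alvo
        · -- the target is found: A returns |acc| + 2; B counts the prefix [.. k]
          subst halvo
          rw [if_pos rfl, if_pos ⟨fun h => hkne h, List.mem_cons_self ..⟩,
            PySem.List.index?_cons_self]
          simp [hkne, PySem.Set.update_cons, PySem.Set.add_of_not_mem hmem,
            PySem.Set.update_nil]
          ring
        · -- a new non-target name: recurse with acc ++ [k] and counter bumped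
          rw [if_neg halvo, PySem.Set.add_of_not_mem hmem]
          have hacc' : alvo ∉ acc ++ [k] := by
            simp only [List.mem_append, List.mem_singleton]
            rintro (h | h)
            · exact hacc h
            · exact halvo h.symm
          have := ih (acc ++ [k]) hacc'
          rw [show (((acc ++ [k]).length : Int) + 1) = (acc.length : Int) + 1 + 1 by simp] at this
          rw [this]
          by_cases hcond : alvo ≠ "" ∧ alvo ∈ ks
          · obtain ⟨j, hj⟩ := Option.isSome_iff_exists.mp ((PySem.List.index?_isSome_iff ks alvo).mpr hcond.2)
            rw [if_pos hcond, if_pos ⟨hcond.1, by simp [hcond.2]⟩,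
              PySem.List.index?_cons_of_ne ks (fun h => halvo h), hj]
            simp [List.take_succ_cons, hkne, PySem.Set.update_cons,
              PySem.Set.add_of_not_mem hmem]
          · rw [if_neg hcond, if_neg (by
              rintro ⟨h1, h2⟩
              rcases List.mem_cons.mp h2 with h | h
              · exact halvo h.symm
              · exact hcond ⟨h1, h⟩)]

-- ===== VERDICT (by name: the statement is the Claim_ definition above) =====
theorem retornar_dim_dev_spec : Claim_equal_retornar_dim_dev := by
  intro devs devJiraNome _
  unfold Spec_retornar_dim_dev retornar_dim_dev retornar_dim_dev_alt
  have h := loop_eq_prefix_count (PySem.Str.lower (PySem.Str.strip devJiraNome)) devs [] (by simp)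
  simp only [List.length_nil, Int.natCast_zero, zero_add] at h
  rw [show (PySem.Set.empty : PySem.Set String) = ([] : List String) from rfl, h]
  by_cases hcond : PySem.Str.lower (PySem.Str.strip devJiraNome) ≠ "" ∧
      PySem.Str.lower (PySem.Str.strip devJiraNome) ∈ retornar_dim_dev_keys devs
  · obtain ⟨j, hj⟩ := Option.isSome_iff_exists.mp
      ((PySem.List.index?_isSome_iff _ _).mpr hcond.2)
    rw [if_pos hcond, if_pos hcond, hj]
    have hcast : ((j : Int) + 1) = ((j + 1 : Nat) : Int) := by push_cast; ring
    simp only [hcast, PySem.List.slice_to_natCast, PySem.Set.update_nil_left]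
  · rw [if_neg hcond, if_neg hcond]
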